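-- pv_equiv track=rewrite | github.com/kkkapuq/AlgorithmStudy | Python/코테 문제/2022 이스트시큐리티/1.py | solution
-- ===== SOURCE A (Python) =====
-- def solution(histogram):
--     answer = 1
--
--     # 막대그래프의 가로
--     width = len(histogram[0])
--     # 막대그래프의 최대 높이
--     height = len(histogram)
--
--     # 경우의 수 리스트
--     tempList = []
--     '''
--     1. 2일 때만 경우의수 체크해주면 됨
--     2. 1일 때는 break 해서 쌓인 경우의 수 곱해주면 됨
--     3. 위에서부터 체크하는걸로 ㄱㄱ
--     '''
--     for i in range(width):
--         cnt = 0
--         for j in range(height):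
--             if histogram[j][i] == 0 and cnt == 0:
--                 continue
--             if histogram[j][i] == 0:
--                 cnt = 0
--             elif histogram[j][i] == 1:
--                 break
--             elif histogram[j][i] == 2:
--                 cnt += 1
--
--         tempList.append(cnt)
--
--     for i in tempList:
--         answer *= i+1
--
--     return answer
-- ===== SOURCE B (Python) =====
-- def solution(histogram):
--     width = len(histogram[0])
--     answer = 1
--     for i in range(width):
--         col = [row[i] for row in histogram]
--         if 1 in col:
--             col = col[:col.index(1)]
--         try:
--             start = len(col) - 1 - col[::-1].index(0)
--         except ValueError:
--             start = -1
--         cnt = col[start + 1:].count(2)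
--         answer *= cnt + 1
--     return answer
-- ===== Notes on version B (the rewrite author's own statement) =====
-- stated objective: alternative
-- what changed: Replaces A's stateful row-by-row counter loop (reset on 0, break on 1) by a per-column slice/search decomposition: cut the column at the first 1, then count 2s strictly after the last 0 of that prefix.
-- outside the precondition, e.g. on solution([[56, 2, 1], [2, 9], [1, 176]]): A returns 4, B raises IndexError
import Mathlib
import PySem

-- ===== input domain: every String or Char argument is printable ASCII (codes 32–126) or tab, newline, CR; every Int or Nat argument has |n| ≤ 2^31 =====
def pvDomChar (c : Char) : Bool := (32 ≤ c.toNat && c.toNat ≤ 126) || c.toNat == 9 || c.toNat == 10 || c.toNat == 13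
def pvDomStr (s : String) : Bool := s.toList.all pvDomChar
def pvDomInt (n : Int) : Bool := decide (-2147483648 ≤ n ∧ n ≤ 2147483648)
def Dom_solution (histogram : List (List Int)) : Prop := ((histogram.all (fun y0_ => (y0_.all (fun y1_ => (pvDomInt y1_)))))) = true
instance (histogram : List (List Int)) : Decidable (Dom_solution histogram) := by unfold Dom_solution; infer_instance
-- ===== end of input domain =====

-- B replaces A's stateful counter loop (reset on 0, break on 1) by slicing each column at
-- the first 1 and counting 2s after the last 0 of that prefix; return values proved equal.

-- ===== PORT A =====
-- the j-loop over rows for a fixed column i: cnt state, reset on 0, break on 1, +1 on 2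
def aInner : List (List Int) → Nat → Int → Int
  | [], _, cnt => cnt
  | row :: rest, i, cnt =>
      let v := row.getD i 0          -- histogram[j][i]; in range under Pre_solution
      if v = 0 ∧ cnt = 0 then aInner rest i cnt
      else if v = 0 then aInner rest i 0
      else if v = 1 then cnt
      else if v = 2 then aInner rest i (cnt + 1)
      else aInner rest i cnt

def solution (histogram : List (List Int)) : Int :=
  match histogram with
  | [] => 0                           -- Python raises IndexError on len(histogram[0]); excluded by Pre_solution
  | row0 :: _ =>
    let width := row0.length
    let tempList := (List.range width).map (fun i => aInner histogram i 0)
    tempList.foldl (fun a c => a * (c + 1)) 1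

-- ===== PORT B =====
-- one column's contribution: slice at first 1, count 2s strictly after the last 0
def bCol (histogram : List (List Int)) (i : Nat) : Int :=
  let col := histogram.map (fun row => row.getD i 0)    -- [row[i] for row in histogram]
  let pre := match PySem.List.index? col (1 : Int) with -- col[:col.index(1)] if 1 in col
    | some k => col.take k
    | none => col
  let start : Int := match PySem.List.index? pre.reverse (0 : Int) with -- len-1-col[::-1].index(0); ValueError → -1
    | some k => (pre.length : Int) - 1 - (k : Int)
    | none => -1
  ((pre.drop (start + 1).toNat).count 2 : Int)          -- col[start+1:].count(2)

def solution_alt (histogram : List (List Int)) : Int :=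
  match histogram with
  | [] => 0                           -- Python raises IndexError here; excluded by Pre_solution
  | row0 :: _ =>
    (List.range row0.length).foldl (fun answer i => answer * (bCol histogram i + 1)) 1

-- ===== PRECONDITION & SPEC =====
-- Pre_ excludes the empty grid and ragged grids with a row shorter than row 0: Python A raises
-- IndexError on them except when an early 'break' on a 1 skips the short row (then A returns a
-- value whose reading of the short column is accidental), and B itself raises IndexError there
-- while materialising the column.
def Pre_solution (histogram : List (List Int)) : Prop :=
  histogram ≠ [] ∧ ∀ row ∈ histogram, (histogram.headD []).length ≤ row.length
instance (histogram : List (List Int)) : Decidable (Pre_solution histogram) := by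
  unfold Pre_solution; infer_instance

def pvWitness_solution : List (List Int) := [[2, 0, 2], [2, 1, 0], [0, 2, 2]]

def Spec_solution (histogram : List (List Int)) (out : Int) : Prop := out = solution_alt histogram
instance (histogram : List (List Int)) (out : Int) : Decidable (Spec_solution histogram out) := by unfold Spec_solution; infer_instance

-- ===== CLAIM (what is proved, stated in full; the proofs are below) =====
def Claim_equal_solution : Prop := ∀ (histogram : List (List Int)), Dom_solution histogram → Pre_solution histogram → Spec_solution histogram (solution histogram)

-- ===== LEMMAS AND PROOFS =====

-- A's j-loop acting on the extracted column values only
def aRun : List Int → Int → Int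
  | [], cnt => cnt
  | v :: rest, cnt =>
      if v = 0 ∧ cnt = 0 then aRun rest cnt
      else if v = 0 then aRun rest 0
      else if v = 1 then cnt
      else if v = 2 then aRun rest (cnt + 1)
      else aRun rest cnt

-- the common characterization both per-column computations are reduced to:
-- number of 2s after the last 0 of the prefix before the first 1
def gCnt (vs : List Int) : Int :=
  (((vs.takeWhile (fun v => v != 1)).reverse.takeWhile (fun v => v != 0)).count 2 : Int)

lemma aInner_eq_aRun (rows : List (List Int)) (i : Nat) (cnt : Int) :
    aInner rows i cnt = aRun (rows.map (fun row => row.getD i 0)) cnt := by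
  induction rows generalizing cnt with
  | nil => rfl
  | cons r rest ih => simp only [aInner, aRun, List.map]; split_ifs <;> first | rfl | apply ih

lemma tw0_append_mem (xs : List Int) (a : Int) (h : (0 : Int) ∈ xs) :
    (xs ++ [a]).takeWhile (fun v => v != 0) = xs.takeWhile (fun v => v != 0) := by
  rw [List.takeWhile_append]
  split_ifs with hl
  · exfalso
    have hx : xs.takeWhile (fun v => v != 0) = xs :=
      (List.takeWhile_prefix _).eq_of_length hl
    have := List.takeWhile_eq_self_iff.mp hx 0 h
    simp at this
  · rfl

lemma tw0_append_not_mem (xs : List Int) (a : Int) (h : (0 : Int) ∉ xs) :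
    (xs ++ [a]).takeWhile (fun v => v != 0) = xs ++ [a].takeWhile (fun v => v != 0) := by
  rw [List.takeWhile_append]
  have hx : xs.takeWhile (fun v => v != 0) = xs := by
    apply List.takeWhile_eq_self_iff.mpr
    intro x hx
    simp only [bne_iff_ne, ne_eq]
    rintro rfl; exact h hx
  rw [if_pos (by rw [hx])]

lemma gCnt_cons_one (rest : List Int) : gCnt (1 :: rest) = 0 := by
  simp [gCnt]

lemma gCnt_cons (v : Int) (rest : List Int) (h1 : v ≠ 1) :
    gCnt (v :: rest) = gCnt rest +
      (if v = 2 ∧ (0 : Int) ∉ rest.takeWhile (fun x => x != 1) then 1 else 0) := by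
  have htw : (v :: rest).takeWhile (fun x => x != 1) =
      v :: rest.takeWhile (fun x => x != 1) := by
    simp [h1]
  set t := rest.takeWhile (fun x => x != 1) with ht
  by_cases hm : (0 : Int) ∈ t
  · have hm' : (0 : Int) ∈ t.reverse := by simpa using hm
    rw [gCnt, htw, List.reverse_cons, tw0_append_mem _ _ hm']
    have hv2 : ¬(v = 2 ∧ (0 : Int) ∉ t) := by rintro ⟨_, h⟩; exact h hm
    rw [if_neg hv2, gCnt]
    ring
  · have hm' : (0 : Int) ∉ t.reverse := by simpa using hm
    have htw0 : t.reverse.takeWhile (fun v => v != 0) = t.reverse := by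
      apply List.takeWhile_eq_self_iff.mpr
      intro x hx
      simp only [bne_iff_ne, ne_eq]
      rintro rfl; exact hm' hx
    have hgr : gCnt rest = (List.count 2 t.reverse : Int) := by
      rw [gCnt, ← ht, htw0]
    have hlhs : gCnt (v :: rest) =
        (List.count 2 ((t.reverse ++ [v]).takeWhile (fun v => v != 0)) : Int) := by
      rw [gCnt, htw, List.reverse_cons]
    rw [hlhs, tw0_append_not_mem _ _ hm', hgr]
    by_cases h0 : v = 0
    · subst h0
      rw [if_neg (by rintro ⟨h, _⟩; norm_num at h)]
      simp
    · have hv1 : ([v].takeWhile (fun v => v != 0)) = [v] := by simp [h0]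
      rw [hv1, List.count_append]
      by_cases h2 : v = 2
      · subst h2
        rw [if_pos ⟨rfl, hm⟩]
        simp
      · rw [if_neg (by rintro ⟨h, _⟩; exact h2 h)]
        simp [h2]

lemma mem_tw1_cons (v : Int) (rest : List Int) (h1 : v ≠ 1) (h0 : v ≠ 0) :
    ((0 : Int) ∈ (v :: rest).takeWhile (fun x => x != 1)) ↔
      ((0 : Int) ∈ rest.takeWhile (fun x => x != 1)) := by
  simp [h1, List.mem_cons, h0.symm]

lemma aRun_eq (vs : List Int) (cnt : Int) :
    aRun vs cnt =
      (if (0 : Int) ∈ vs.takeWhile (fun x => x != 1) then 0 else cnt) + gCnt vs := by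
  induction vs generalizing cnt with
  | nil => simp [aRun, gCnt]
  | cons v rest ih =>
      by_cases h1 : v = 1
      · subst h1
        rw [gCnt_cons_one]
        simp [aRun]
      · by_cases h0 : v = 0
        · subst h0
          have hm : (0 : Int) ∈ ((0 : Int) :: rest).takeWhile (fun x => x != 1) := by
            simp
          rw [if_pos hm, gCnt_cons 0 rest (by norm_num),
            if_neg (by rintro ⟨h, _⟩; norm_num at h)]
          have hstep : aRun (0 :: rest) cnt = aRun rest 0 := by
            by_cases hc : cnt = 0
            · subst hc; simp [aRun]
            · simp [aRun, hc]
          rw [hstep, ih]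
          split_ifs <;> ring
        · rw [gCnt_cons v rest h1]
          by_cases hm : (0 : Int) ∈ rest.takeWhile (fun x => x != 1)
          · rw [if_pos ((mem_tw1_cons v rest h1 h0).mpr hm),
              if_neg (by rintro ⟨_, h⟩; exact h hm)]
            by_cases h2 : v = 2
            · subst h2
              have : aRun (2 :: rest) cnt = aRun rest (cnt + 1) := by
                simp [aRun]
              rw [this, ih, if_pos hm]; ring
            · have : aRun (v :: rest) cnt = aRun rest cnt := by
                simp [aRun, h0, h1, h2]
              rw [this, ih, if_pos hm]; ring
          · rw [if_neg (fun h => hm ((mem_tw1_cons v rest h1 h0).mp h))]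
            by_cases h2 : v = 2
            · subst h2
              have : aRun (2 :: rest) cnt = aRun rest (cnt + 1) := by
                simp [aRun]
              rw [this, ih, if_neg hm, if_pos ⟨rfl, hm⟩]; ring
            · have : aRun (v :: rest) cnt = aRun rest cnt := by
                simp [aRun, h0, h1, h2]
              rw [this, ih, if_neg hm, if_neg (by rintro ⟨h, _⟩; exact h2 h)]; ring

-- B's first slice (cut at the first 1) is the takeWhile prefix
lemma pre_eq (col : List Int) :
    (match PySem.List.index? col (1 : Int) with
      | some k => col.take k
      | none => col) = col.takeWhile (fun v => v != 1) := by
  induction col with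
  | nil => rfl
  | cons x rest ih =>
      rw [PySem.List.index?_eq_idxOf?] at *
      by_cases hx : x = 1
      · subst hx
        simp [List.idxOf?_cons]
      · rw [List.idxOf?_cons, if_neg (by simpa using hx)]
        rw [List.takeWhile_cons, if_pos (by simpa using hx)]
        cases h : List.idxOf? (1 : Int) rest with
        | none => rw [h] at ih; simpa using ih
        | some k => rw [h] at ih; simpa using ih

-- on a list whose k-th element is the first 0, takeWhile (≠0) is take k
lemma tw0_eq_take (l : List Int) (k : Nat) (hk : k < l.length) (h0 : l[k] = 0)
    (hfirst : ∀ j (hj : j < k), l[j]'(by omega) ≠ 0) :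
    l.takeWhile (fun v => v != 0) = l.take k := by
  induction l generalizing k with
  | nil => simp at hk
  | cons x rest ih =>
      cases k with
      | zero =>
          simp at h0
          simp [h0]
      | succ k =>
          have hx : x ≠ 0 := hfirst 0 (Nat.succ_pos k)
          rw [List.takeWhile_cons, if_pos (by simpa using hx), List.take_succ_cons]
          congr 1
          exact ih k (by simpa using hk) (by simpa using h0)
            (fun j hj => by
              have := hfirst (j + 1) (by omega)
              simpa using this)

-- B's second slice (drop past the last 0) counts the 2s of takeWhile (≠0) of the reverse
lemma suf_count (p : List Int) :
    ((p.drop (((match PySem.List.index? p.reverse (0 : Int) with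
        | some k => (p.length : Int) - 1 - (k : Int)
        | none => -1) + 1).toNat)).count 2 : Int)
      = ((p.reverse.takeWhile (fun v => v != 0)).count 2 : Int) := by
  cases h : PySem.List.index? p.reverse (0 : Int) with
  | none =>
      rw [PySem.List.index?_eq_idxOf?] at h
      have hnm : (0 : Int) ∉ p.reverse := List.idxOf?_eq_none_iff.mp h
      have htw : p.reverse.takeWhile (fun v => v != 0) = p.reverse := by
        apply List.takeWhile_eq_self_iff.mpr
        intro x hx
        simp only [bne_iff_ne, ne_eq]
        rintro rfl; exact hnm hx
      rw [htw]
      simp [List.count_reverse]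
  | some k =>
      obtain ⟨hk, hk0, hfirst⟩ := PySem.List.getElem_of_index?_eq_some h
      have hklen : k < p.length := by simpa using hk
      have htw : p.reverse.takeWhile (fun v => v != 0) = p.reverse.take k :=
        tw0_eq_take p.reverse k hk hk0 hfirst
      have hnat : (((p.length : Int) - 1 - (k : Int)) + 1).toNat = p.length - k := by
        omega
      rw [htw, hnat, List.take_reverse, List.count_reverse]

lemma bCol_eq_gCnt (histogram : List (List Int)) (i : Nat) :
    bCol histogram i = gCnt (histogram.map (fun row => row.getD i 0)) := by
  simp only [bCol]
  rw [pre_eq]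
  unfold gCnt
  exact suf_count _

lemma col_eq (histogram : List (List Int)) (i : Nat) :
    aInner histogram i 0 = bCol histogram i := by
  rw [aInner_eq_aRun, aRun_eq, bCol_eq_gCnt]
  split_ifs <;> ring

-- ===== VERDICT (by name: the statement is the Claim_ definition above) =====
theorem solution_spec : Claim_equal_solution := by
  intro histogram _ _
  unfold Spec_solution
  cases histogram with
  | nil => rfl
  | cons row0 t =>
      simp only [solution, solution_alt, List.foldl_map, col_eq]
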